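-- pv_equiv track=rewrite | github.com/pursuitprimebc/python-content | codechef_DSA/practice_array/question_03.py | check_coupon
-- ===== SOURCE A (Python) =====
-- def check_coupon(n, x, y, prices):
--
--     cost_without_coupon = sum(prices)
--     cost_with_coupon = x
--
--     for p in prices:
--         cost_with_coupon += max(0, p - y)
--     if cost_with_coupon < cost_without_coupon:
--         return "COUPON"
--     else:
--         return "NO COUPON"
-- ===== SOURCE B (Python) =====
-- def check_coupon(n, x, y, prices):
--     savings = 0
--     rest = len(prices)
--     for p in sorted(prices):
--         if p > y:
--             savings += y * rest
--             break
--         savings += p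
--         rest -= 1
--     return "COUPON" if x < savings else "NO COUPON"
-- ===== Notes on version B (the rewrite author's own statement) =====
-- stated objective: alternative
-- what changed: Sorts the prices, sums the sorted prefix of prices not exceeding y, stops at the first price above y and accounts for the whole remaining tail in closed form as y times its length, then compares that total saving against x; A instead makes two unsorted accumulations (sum of prices and x plus sum of max(0,p-y)) and compares the two totals.
import Mathlib
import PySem

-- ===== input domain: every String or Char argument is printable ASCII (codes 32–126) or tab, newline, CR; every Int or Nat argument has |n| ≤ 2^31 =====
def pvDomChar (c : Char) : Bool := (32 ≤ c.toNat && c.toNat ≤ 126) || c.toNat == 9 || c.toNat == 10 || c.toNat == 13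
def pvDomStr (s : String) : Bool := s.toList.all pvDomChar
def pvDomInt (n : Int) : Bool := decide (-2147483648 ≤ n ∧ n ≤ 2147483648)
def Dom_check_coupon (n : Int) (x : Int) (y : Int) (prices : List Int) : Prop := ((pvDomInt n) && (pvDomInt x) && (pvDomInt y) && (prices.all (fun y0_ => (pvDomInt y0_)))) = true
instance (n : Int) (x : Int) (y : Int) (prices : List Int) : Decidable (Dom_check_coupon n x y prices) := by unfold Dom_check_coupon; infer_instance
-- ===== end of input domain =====

-- B sorts the prices, adds up the sorted prefix ≤ y, accounts for the tail above y in closed form as y * (tail length), and compares against x; an alternative sort-based decomposition of A's two-total comparison.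


-- ===== PORT A =====
def check_coupon (n : Int) (x : Int) (y : Int) (prices : List Int) : String :=
  let cost_without_coupon := prices.sum
  let cost_with_coupon := prices.foldl (fun acc p => acc + max 0 (p - y)) x
  if cost_with_coupon < cost_without_coupon then "COUPON" else "NO COUPON"

-- ===== PORT B =====
-- the for-loop over sorted(prices) with break: state (savings, rest)
def checkCouponAltLoop (y : Int) : List Int → Int → Int → Int
  | [], savings, _ => savings
  | p :: t, savings, rest =>
      if p > y then savings + y * rest
      else checkCouponAltLoop y t (savings + p) (rest - 1)

def check_coupon_alt (n : Int) (x : Int) (y : Int) (prices : List Int) : String :=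
  let savings := checkCouponAltLoop y (PySem.List.sorted prices (fun p => p) false) 0 (prices.length : Int)
  if x < savings then "COUPON" else "NO COUPON"

-- ===== PRECONDITION & SPEC =====
def Spec_check_coupon (n : Int) (x : Int) (y : Int) (prices : List Int) (out : String) : Prop := out = check_coupon_alt n x y prices
instance (n : Int) (x : Int) (y : Int) (prices : List Int) (out : String) : Decidable (Spec_check_coupon n x y prices out) := by unfold Spec_check_coupon; infer_instance

-- ===== CLAIM (what is proved, stated in full; the proofs are below) =====
def Claim_equal_check_coupon : Prop := ∀ (n : Int) (x : Int) (y : Int) (prices : List Int), Dom_check_coupon n x y prices → Spec_check_coupon n x y prices (check_coupon n x y prices)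

-- ===== LEMMAS AND PROOFS =====
-- A's loop is a foldl-add: rewrite to acc + sum of the mapped list
theorem pv_foldl_add (f : Int → Int) : ∀ (ps : List Int) (a : Int),
    ps.foldl (fun acc p => acc + f p) a = a + (ps.map f).sum := by
  intro ps
  induction ps with
  | nil => intro a; simp
  | cons p t ih => intro a; simp [List.foldl, ih]; ring

theorem pv_sum_split (y : Int) : ∀ (ps : List Int),
    (ps.map (fun p => max 0 (p - y))).sum + (ps.map (fun p => min p y)).sum = ps.sum := by
  intro ps
  induction ps with
  | nil => simp
  | cons p t ih => simp [List.sum_cons]; omega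

-- on a ≤-sorted list with rest = its length, B's loop computes Σ min(p, y)
theorem pv_altLoop_sorted (y : Int) : ∀ (l : List Int) (s : Int),
    l.Pairwise (· ≤ ·) →
    checkCouponAltLoop y l s (l.length : Int) = s + (l.map (fun p => min p y)).sum := by
  intro l
  induction l with
  | nil => intro s _; simp [checkCouponAltLoop]
  | cons p t ih =>
    intro s hp
    rcases List.pairwise_cons.mp hp with ⟨hhead, htail⟩
    by_cases h : p > y
    · -- every element of the tail is ≥ p > y, so each min is y
      have hall : ∀ q ∈ t, y < q := fun q hq => lt_of_lt_of_le h (hhead q hq)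
      have htl : (t.map (fun q => min q y)).sum = y * (t.length : Int) := by
        clear htail hp ih hhead
        induction t with
        | nil => simp
        | cons q r ihr =>
          have hq := hall q (by simp)
          have hr := ihr (fun q' hq' => hall q' (by simp [hq']))
          rw [List.map_cons, List.sum_cons, hr, min_eq_right (le_of_lt hq),
            List.length_cons]
          push_cast
          ring
      simp [checkCouponAltLoop, h, htl, min_eq_right (le_of_lt h)]
      ring
    · have : min p y = p := min_eq_left (not_lt.mp h)
      simp only [checkCouponAltLoop, if_neg h]
      have hlen : ((p :: t).length : Int) - 1 = (t.length : Int) := by simp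
      rw [hlen, ih (s + p) htail]
      simp [this]
      ring

theorem pv_min_sum (y : Int) (prices : List Int) :
    ((PySem.List.sorted prices (fun p => p) false).map (fun p => min p y)).sum
      = (prices.map (fun p => min p y)).sum := by
  exact List.Perm.sum_eq (List.Perm.map _ (PySem.List.sorted_perm prices (fun p => p) false))

-- ===== VERDICT (by name: the statement is the Claim_ definition above) =====
theorem check_coupon_spec : Claim_equal_check_coupon := by
  intro n x y prices _
  unfold Spec_check_coupon check_coupon check_coupon_alt
  have hsorted : (PySem.List.sorted prices (fun p => p) false).Pairwise (· ≤ ·) :=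
    PySem.List.sorted_pairwise prices (fun p => p)
  have hlen : ((PySem.List.sorted prices (fun p => p) false).length : Int) = (prices.length : Int) := by
    rw [PySem.List.length_sorted]
  rw [← hlen, pv_altLoop_sorted y _ 0 hsorted, pv_min_sum]
  simp only [pv_foldl_add]
  have h := pv_sum_split y prices
  have hiff : (x + (prices.map (fun p => max 0 (p - y))).sum < prices.sum) =
      (x < 0 + (prices.map (fun p => min p y)).sum) := by
    simp only [eq_iff_iff]; omega
  simp only [hiff]
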